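-- pv_equiv track=rewrite | github.com/mdoran3/TIP102 | week7/session2/determining_profitability_of_excursions.py | is_profitable
-- ===== SOURCE A (Python) =====
-- def is_profitable(excursion_counts):
--     nums = len(excursion_counts)
--     count = 0
--     for i in range(0, len(excursion_counts)):
--         if excursion_counts[i] >= nums:
--             count +=1
--     if count == 0:
--         return -1
--     return count
-- ===== SOURCE B (Python) =====
-- def is_profitable(excursion_counts):
--     nums = len(excursion_counts)
--     ordered = sorted(excursion_counts)
--     # binary search (bisect_left) for the first element >= nums
--     lo, hi = 0, len(ordered)
--     while lo < hi:
--         mid = (lo + hi) // 2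
--         if ordered[mid] < nums:
--             lo = mid + 1
--         else:
--             hi = mid
--     count = len(ordered) - lo
--     return count if count > 0 else -1
-- ===== Notes on version B (the rewrite author's own statement) =====
-- stated objective: alternative
-- what changed: Instead of scanning indices and counting elements >= len one by one, B sorts a copy of the list and binary-searches (bisect_left) for the first element >= len; the answer is the suffix length, -1 if empty.
import Mathlib
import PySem

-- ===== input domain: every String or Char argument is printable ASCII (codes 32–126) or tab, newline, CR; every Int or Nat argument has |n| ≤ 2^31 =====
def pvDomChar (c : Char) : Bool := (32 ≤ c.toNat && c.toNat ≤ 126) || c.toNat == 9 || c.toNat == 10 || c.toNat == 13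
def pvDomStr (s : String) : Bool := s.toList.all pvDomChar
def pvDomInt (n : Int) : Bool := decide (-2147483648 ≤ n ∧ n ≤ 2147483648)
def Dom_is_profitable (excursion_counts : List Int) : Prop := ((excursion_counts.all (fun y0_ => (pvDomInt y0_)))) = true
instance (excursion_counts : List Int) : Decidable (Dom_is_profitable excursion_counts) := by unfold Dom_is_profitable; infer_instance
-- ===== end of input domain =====

-- B replaces A's index scan by sort-a-copy + bisect_left (alternative decomposition, not faster); no argument mutation.
-- ===== PORT A =====
def is_profitable (excursion_counts : List Int) : Int :=
  let nums : Int := excursion_counts.length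
  let count : Int :=
    (PySem.List.pyRange 0 excursion_counts.length 1).foldl
      (fun count i =>
        if PySem.List.pyGetD excursion_counts i 0 ≥ nums then count + 1 else count)
      0
  if count = 0 then -1 else count

-- ===== PORT B =====
-- the hand-written while-loop in Source B is exactly the bisect_left binary search, ported as PySem.List.bisectLeft
def is_profitable_alt (excursion_counts : List Int) : Int :=
  let nums : Int := excursion_counts.length
  let ordered := PySem.List.sorted excursion_counts (fun x => x) false
  let lo := PySem.List.bisectLeft ordered nums
  let count : Int := (ordered.length : Int) - lo
  if count > 0 then count else -1

-- ===== PRECONDITION & SPEC =====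
def Spec_is_profitable (excursion_counts : List Int) (out : Int) : Prop := out = is_profitable_alt excursion_counts
instance (excursion_counts : List Int) (out : Int) : Decidable (Spec_is_profitable excursion_counts out) := by unfold Spec_is_profitable; infer_instance

-- ===== CLAIM (what is proved, stated in full; the proofs are below) =====
def Claim_equal_is_profitable : Prop := ∀ (excursion_counts : List Int), Dom_is_profitable excursion_counts → Spec_is_profitable excursion_counts (is_profitable excursion_counts)

-- ===== LEMMAS AND PROOFS =====

-- On a ≤-sorted list, bisect_left's result counts the elements < x, so the suffix length is countP (x ≤ ·).
theorem countP_eq_length_sub_bisectLeft (s : List Int) (x : Int)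
    (hs : s.Pairwise (fun a b => a ≤ b)) :
    List.countP (fun y => decide (y ≥ x)) s = s.length - PySem.List.bisectLeft s x ∧
    PySem.List.bisectLeft s x ≤ s.length := by
  obtain ⟨hle, hlt, hge⟩ := PySem.List.bisectLeft_spec s x hs
  set r := PySem.List.bisectLeft s x with hr
  refine ⟨?_, hle⟩
  have h1 : List.countP (fun y => decide (y ≥ x)) (s.take r) = 0 := by
    rw [List.countP_eq_zero]
    intro a ha
    obtain ⟨j, hj, hja⟩ := List.mem_iff_getElem.mp ha
    have hjr : j < r ∧ j < s.length := by simpa [List.length_take] using hj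
    have hjlen : j < s.length := hjr.2
    have hv := hlt j hjlen hjr.1
    have hga : a = s[j]'hjlen := by rw [← hja]; exact List.getElem_take
    simp only [ge_iff_le, decide_eq_true_eq]
    omega
  have h2 : List.countP (fun y => decide (y ≥ x)) (s.drop r) = (s.drop r).length := by
    rw [List.countP_eq_length]
    intro a ha
    obtain ⟨j, hj, hja⟩ := List.mem_iff_getElem.mp ha
    have hjlen : r + j < s.length := by
      have := hj; simp only [List.length_drop] at this; omega
    have hge' := hge (r + j) hjlen (Nat.le_add_right r j)
    have hga : a = s[r + j]'hjlen := by rw [← hja]; exact List.getElem_drop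
    simp only [ge_iff_le, decide_eq_true_eq]
    omega
  calc List.countP (fun y => decide (y ≥ x)) s
      = List.countP (fun y => decide (y ≥ x)) (s.take r ++ s.drop r) := by
        rw [List.take_append_drop]
    _ = s.length - r := by
        rw [List.countP_append, h1, h2]
        simp [List.length_drop]

theorem is_profitable_eq (xs : List Int) : is_profitable xs = is_profitable_alt xs := by
  unfold is_profitable is_profitable_alt
  simp only []
  set n : Int := (xs.length : Int) with hn
  set s := PySem.List.sorted xs (fun x => x) false with hsdef
  have hperm : s.Perm xs := PySem.List.sorted_perm xs (fun x => x) false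
  have hpw : s.Pairwise (fun a b => a ≤ b) := PySem.List.sorted_pairwise xs (fun x => x)
  obtain ⟨hcnt, hle⟩ := countP_eq_length_sub_bisectLeft s n hpw
  have hlen : s.length = xs.length := hperm.length_eq
  -- A's fold computes the countP over xs
  have hA : (PySem.List.pyRange 0 (xs.length : Int) 1).foldl
      (fun count i => if PySem.List.pyGetD xs i 0 ≥ n then count + 1 else count) (0 : Int)
      = (List.countP (fun y => decide (y ≥ n)) xs : Int) := by
    rw [PySem.List.foldl_pyRange_zero_pyGetD' xs 0
      (fun count x => if x ≥ n then count + 1 else count) 0]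
    have := PySem.List.foldl_count_if (fun y => decide (y ≥ n)) xs 0
    simpa using this
  have hcount_perm : List.countP (fun y => decide (y ≥ n)) xs
      = List.countP (fun y => decide (y ≥ n)) s := (hperm.countP_eq _).symm
  rw [hA, hcount_perm, hcnt]
  split_ifs with h1 h2 h2 <;> omega

-- ===== VERDICT (by name: the statement is the Claim_ definition above) =====
theorem is_profitable_spec : Claim_equal_is_profitable := by
  intro xs _
  unfold Spec_is_profitable
  exact is_profitable_eq xs
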